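-- pv_equiv track=rewrite | github.com/cepalium/daily-coding-problems | python/331.py | flip_x_before_y
-- ===== SOURCE A (Python) =====
-- def flip_x_before_y(str):
--     """ return the number of flip to have all x before all y in string """
--     if len(str) < 2:  # trivial cases: length 0 or 1
--         return 0
--     start_flip = False
--     num_flips = 0
--     for c in str[::-1]:
--         if c != 'x' and c != 'y':
--             raise ValueError("String can contain 'x' or 'y' only.")
--         if c == 'x' and start_flip == False:
--             start_flip = True
--             continue
--         if c == 'y' and start_flip == True:
--             num_flips += 1
--             continue
--     return num_flips
-- ===== SOURCE B (Python) =====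
-- def flip_x_before_y(str):
--     """ return the number of flip to have all x before all y in string """
--     if len(str) < 2:  # trivial cases skip validation, as in the original
--         return 0
--     for c in str:
--         if c != 'x' and c != 'y':
--             raise ValueError("String can contain 'x' or 'y' only.")
--     last_x = str.rfind('x')
--     if last_x == -1:
--         return 0
--     return str[:last_x].count('y')
-- ===== Notes on version B (the rewrite author's own statement) =====
-- stated objective: simpler
-- what changed: A's single reversed scan with a start_flip flag and accumulator is replaced by locating the rightmost 'x' with str.rfind('x') and counting 'y' in the prefix before it.
-- outside the precondition, e.g. on flip_x_before_y('xz'): A raises ValueError, B raises ValueError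
import Mathlib
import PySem

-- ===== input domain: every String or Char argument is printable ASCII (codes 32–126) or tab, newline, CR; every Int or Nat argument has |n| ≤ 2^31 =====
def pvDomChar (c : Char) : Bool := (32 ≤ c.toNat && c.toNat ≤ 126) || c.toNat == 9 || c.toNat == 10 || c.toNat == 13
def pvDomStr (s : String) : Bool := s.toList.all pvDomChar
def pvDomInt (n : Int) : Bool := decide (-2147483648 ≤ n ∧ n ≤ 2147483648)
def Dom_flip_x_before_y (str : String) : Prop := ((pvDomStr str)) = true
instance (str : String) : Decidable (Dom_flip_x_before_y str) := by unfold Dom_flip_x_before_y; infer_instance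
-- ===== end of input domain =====

-- B replaces A's reversed scan with a maintained flag by rfind('x') + a prefix count of 'y' (objective: simpler decomposition, same O(n)).


-- ===== PORT A =====
-- A's loop over str[::-1] with state (start_flip, num_flips); the ValueError branch
-- returns 0 (those inputs are excluded by Pre_ below).
def flipALoop : List Char → Bool → Int → Int
  | [], _, num_flips => num_flips
  | c :: cs, start_flip, num_flips =>
    if ¬(c = 'x' ∨ c = 'y') then 0  -- raise ValueError (outside Pre_)
    else if c = 'x' ∧ start_flip = false then flipALoop cs true num_flips
    else if c = 'y' ∧ start_flip = true then flipALoop cs start_flip (num_flips + 1)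
    else flipALoop cs start_flip num_flips

def flip_x_before_y (str : String) : Int :=
  if PySem.Str.len str < 2 then 0
  else
    -- str[::-1] is the reverse (PySem.Str.slice?_none_none_neg_one)
    flipALoop str.toList.reverse false 0

-- ===== PORT B =====
-- B: validate, then last_x = str.rfind('x'); 0 if absent, else str[:last_x].count('y').
def flip_x_before_y_alt (str : String) : Int :=
  let l := str.toList
  if l.length < 2 then 0
  else if l.any (fun c => ¬(c = 'x' ∨ c = 'y')) then 0  -- raise ValueError (outside Pre_)
  else
    let last_x := PySem.Chars.rfind l ['x']
    if last_x = -1 then 0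
    else (PySem.Chars.count (PySem.List.slice l none (some last_x)) ['y'] : Int)

-- ===== PRECONDITION & SPEC =====
-- Pre_ excludes exactly the inputs where A raises ValueError: length ≥ 2 with a character
-- other than 'x'/'y'.  (B raises the same ValueError there, so nothing B returns is excluded.)
def Pre_flip_x_before_y (str : String) : Prop :=
  str.toList.length < 2 ∨ (str.toList.all (fun c => c == 'x' || c == 'y')) = true
instance (str : String) : Decidable (Pre_flip_x_before_y str) := by
  unfold Pre_flip_x_before_y; infer_instance

def pvWitness_flip_x_before_y : String := "yxy"

def Spec_flip_x_before_y (str : String) (out : Int) : Prop := out = flip_x_before_y_alt str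
instance (str : String) (out : Int) : Decidable (Spec_flip_x_before_y str out) := by unfold Spec_flip_x_before_y; infer_instance

-- ===== CLAIM (what is proved, stated in full; the proofs are below) =====
def Claim_equal_flip_x_before_y : Prop := ∀ (str : String), Dom_flip_x_before_y str → Pre_flip_x_before_y str → Spec_flip_x_before_y str (flip_x_before_y str)

-- ===== LEMMAS AND PROOFS =====

-- first-occurrence decomposition
lemma exists_first_mem {α : Type} [DecidableEq α] {c : α} {r : List α} (h : c ∈ r) :
    ∃ a b, r = a ++ c :: b ∧ c ∉ a := by
  induction r with
  | nil => cases h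
  | cons h' t ih =>
    by_cases hc : h' = c
    · exact ⟨[], t, by simp [hc], by simp⟩
    · have hct : c ∈ t := by
        rcases List.mem_cons.mp h with h1 | h1
        · exact absurd h1.symm hc
        · exact h1
      obtain ⟨a, b, hab, hna⟩ := ih hct
      refine ⟨h' :: a, b, by simp [hab], ?_⟩
      simp only [List.mem_cons]
      rintro (h1 | h1)
      · exact hc h1.symm
      · exact hna h1

-- A's loop with the flag already set counts every 'y'
lemma flipALoop_true (r : List Char) (hv : ∀ c ∈ r, c = 'x' ∨ c = 'y') (n : Int) :
    flipALoop r true n = n + r.count 'y' := by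
  induction r generalizing n with
  | nil => simp [flipALoop]
  | cons c cs ih =>
    rcases hv c (by simp) with hc | hc <;>
      simp [flipALoop, hc, ih (fun d hd => hv d (by simp [hd]))] <;> ring

-- with no 'x' and the flag unset, nothing is counted
lemma flipALoop_false_no_x (r : List Char) (hv : ∀ c ∈ r, c = 'x' ∨ c = 'y')
    (hx : 'x' ∉ r) (n : Int) : flipALoop r false n = n := by
  induction r generalizing n with
  | nil => simp [flipALoop]
  | cons c cs ih =>
    have hc : c = 'y' := by
      rcases hv c (by simp) with hc | hc
      · exact absurd (by simp [hc]) hx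
      · exact hc
    simpa [flipALoop, hc] using ih (fun d hd => hv d (by simp [hd])) (by simp_all) n

-- flag unset: skip the 'y's before the first 'x', then count the rest
lemma flipALoop_false_split (a b : List Char) (hv : ∀ c ∈ a ++ 'x' :: b, c = 'x' ∨ c = 'y')
    (hna : 'x' ∉ a) (n : Int) :
    flipALoop (a ++ 'x' :: b) false n = n + b.count 'y' := by
  induction a generalizing n with
  | nil =>
    simpa [flipALoop] using flipALoop_true b (fun d hd => hv d (by simp [hd])) n
  | cons c cs ih =>
    have hc : c = 'y' := by
      rcases hv c (by simp) with hc | hc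
      · exact absurd (by simp [hc]) hna
      · exact hc
    simpa [flipALoop, hc] using ih (fun d hd => hv d (by simp_all)) (by simp_all) n

-- rfind.go on needle ['x']: with no 'x' after index u.length, the scan stops at u.length
lemma rfind_go_of_last {u v : List Char} (hv : 'x' ∉ v) :
    ∀ k, u.length ≤ k → k ≤ (u ++ 'x' :: v).length →
      PySem.Chars.rfind.go (u ++ 'x' :: v) ['x'] k = u.length := by
  intro k
  induction k with
  | zero =>
    intro hle _
    have hu : u = [] := List.eq_nil_of_length_eq_zero (Nat.le_zero.mp hle)
    subst hu
    rw [PySem.Chars.rfind.go]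
    simp [List.isPrefixOf]
  | succ j ih =>
    intro hle hub
    rw [PySem.Chars.rfind.go]
    by_cases he : u.length = j + 1
    · have hd : (u ++ 'x' :: v).drop (j + 1) = 'x' :: v := by
        rw [← he]; exact List.drop_left
      rw [hd]
      simp [List.isPrefixOf]
      omega
    · have hj : u.length ≤ j := by omega
      have hnp : ¬ (List.isPrefixOf ['x'] ((u ++ 'x' :: v).drop (j + 1)) = true) := by
        have hd : (u ++ 'x' :: v).drop (j + 1) = v.drop (j - u.length) := by
          rw [show u ++ 'x' :: v = (u ++ ['x']) ++ v from by simp,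
            show j + 1 = (u ++ ['x']).length + (j - u.length) from by simp; omega,
            List.drop_append]
          simp
        rw [List.isPrefixOf_iff_prefix, hd]
        intro hp
        exact hv (List.mem_of_mem_drop (hp.subset (by simp)))
      rw [if_neg hnp]
      exact ih hj (by omega)

lemma rfind_last {u v : List Char} (hv : 'x' ∉ v) :
    PySem.Chars.rfind (u ++ 'x' :: v) ['x'] = u.length := by
  unfold PySem.Chars.rfind
  exact rfind_go_of_last hv _ (by simp) (le_refl _)

lemma rfind_go_no_x {l : List Char} (hx : 'x' ∉ l) :
    ∀ k, PySem.Chars.rfind.go l ['x'] k = -1 := by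
  intro k
  have hnp : ∀ m : List Char, m = l ∨ (∃ j, m = l.drop j) → ¬ (List.isPrefixOf ['x'] m = true) := by
    rintro m hm
    rw [List.isPrefixOf_iff_prefix]
    intro hp
    rcases hm with rfl | ⟨j, rfl⟩
    · exact hx (hp.subset (by simp))
    · exact hx (List.mem_of_mem_drop (hp.subset (by simp)))
  induction k with
  | zero =>
    rw [PySem.Chars.rfind.go]
    rw [if_neg (hnp l (Or.inl rfl))]
  | succ j ih =>
    rw [PySem.Chars.rfind.go]
    rw [if_neg (hnp _ (Or.inr ⟨j + 1, rfl⟩))]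
    exact ih

lemma rfind_no_x {l : List Char} (hx : 'x' ∉ l) :
    PySem.Chars.rfind l ['x'] = -1 := by
  unfold PySem.Chars.rfind
  exact rfind_go_no_x hx _

-- Chars.count with a single-char needle is List.count
lemma count_go_single (c : Char) : ∀ (l : List Char) (acc : Nat),
    PySem.Chars.count.go [c] l.length l acc = acc + l.count c := by
  intro l
  induction l with
  | nil => intro acc; simp [PySem.Chars.count.go]
  | cons h t ih =>
    intro acc
    simp only [List.length_cons]
    rw [PySem.Chars.count.go]
    by_cases hc : h = c
    · simp [List.isPrefixOf, hc, ih]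
      omega
    · simp [List.isPrefixOf, hc, ih]
      exact fun h' => hc h'.symm

lemma count_single (l : List Char) (c : Char) :
    PySem.Chars.count l [c] = l.count c := by
  unfold PySem.Chars.count
  simpa using count_go_single c l 0

-- ===== VERDICT (by name: the statement is the Claim_ definition above) =====
theorem flip_x_before_y_spec : Claim_equal_flip_x_before_y := by
  intro str _dom hpre
  unfold Spec_flip_x_before_y flip_x_before_y flip_x_before_y_alt
  have hLen : str.toList.length = str.length := by simp
  by_cases hlen : str.toList.length < 2
  · have h1 : str.length ≤ 1 := by omega
    simp [PySem.Str.len_eq, h1]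
  · have hv : ∀ c ∈ str.toList, c = 'x' ∨ c = 'y' := by
      rcases hpre with h | h
      · exact absurd h hlen
      · intro c hc
        simpa using List.all_eq_true.mp h c hc
    have h1 : ¬ str.length ≤ 1 := by omega
    have hnex : ¬ ∃ x ∈ str.toList, ¬x = 'x' ∧ ¬x = 'y' := by
      rintro ⟨x, hx, hx1, hx2⟩
      rcases hv x hx with h | h
      · exact hx1 h
      · exact hx2 h
    by_cases hx : 'x' ∈ str.toList
    · have hxr : 'x' ∈ str.toList.reverse := by simpa using hx
      obtain ⟨a, b, hab, hna⟩ := exists_first_mem hxr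
      have hl : str.toList = b.reverse ++ 'x' :: a.reverse := by
        have h0 : str.toList = (a ++ 'x' :: b).reverse := by
          rw [← hab, List.reverse_reverse]
        rw [h0]; simp
      have hvr : ∀ c ∈ a ++ 'x' :: b, c = 'x' ∨ c = 'y' := by
        intro c hc
        exact hv c (List.mem_reverse.mp (hab ▸ hc))
      have hrf : PySem.Chars.rfind str.toList ['x'] = (b.length : Int) := by
        rw [hl]
        simpa using rfind_last (u := b.reverse) (v := a.reverse) (by simpa using hna)
      have hne : ¬ (PySem.Chars.rfind str.toList ['x'] = -1) := by
        rw [hrf]; omega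
      have hslice : PySem.List.slice str.toList none (some (PySem.Chars.rfind str.toList ['x'])) = b.reverse := by
        rw [hrf, PySem.List.slice_to str.toList (by omega)]
        rw [hl]
        simp
      have hA : flipALoop str.toList.reverse false 0 = (b.count 'y' : Int) := by
        rw [hab]
        simpa using flipALoop_false_split a b hvr hna 0
      simp [PySem.Str.len_eq, h1, hnex, hne, hslice, hA, count_single]
    · have hA : flipALoop str.toList.reverse false 0 = 0 :=
        flipALoop_false_no_x _ (fun c hc => hv c (by simpa using hc)) (by simpa using hx) 0
      simp [PySem.Str.len_eq, h1, hnex, rfind_no_x hx, hA]
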